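/- GENERATED by farm/mkstatement.py from design/units.tsv (unit `start_decoder.F4a`) and the assertions of Vorbis/Spec/StartDecoderF4.lean — do not edit.
   THE STATEMENT of the proof unit `start_decoder.F4a`: segment F4a of `start_decoder` (1 instructions; entries 0x115494;
   exits 0x115499; ranges 0x115494-0x115494)
   takes each of its entry assertions to one of its exit assertions (`Vorbis.Spec.StartDecoder.SegF4a`), given the contracts of its callees.
   What the names mean: Vorbis/Spec/Basic.lean (the shared hypotheses), Vorbis/Spec/StartDecoderF4.lean (the assertions). The theorem to prove:
   `theorem start_decoder_F4a_ok : Vorbis.Spec.start_decoder_F4a.Statement`. -/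
import Vorbis.Spec.StartDecoderF4
namespace Vorbis.Spec.start_decoder_F4a
open X86 X86.User Asan

/-- The statement of unit `start_decoder.F4a`. -/
def Statement : Prop :=
  ∀ (Lay : Layout) (_hLay : Lay.hi = 0x1000000) (μ : Microarch) (_hμ : UserX.MicroOK μ) (u₀ : State)
    (_hcode : HasCodeNat Lay u₀ Vorbis.L.start_decoder.entry Vorbis.Code.code_start_decoder.nat Vorbis.L.start_decoder.size),
    Vorbis.Spec.StartDecoder.SegF4a Lay μ u₀

end Vorbis.Spec.start_decoder_F4a
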